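-- pv_equiv track=rewrite | github.com/alexandraback/datacollection | solutions_5670465267826688_0/Python/paimon/c.py | solve
-- ===== SOURCE A (Python) =====
-- def mul(x, y):
--     t = {
--         ('i', 'j'): 'k',
--         ('j', 'k'): 'i',
--         ('k', 'i'): 'j'
--     }
--     s = x[1]*y[1]
--     if x[0] == '1':
--         f = y[0]
--     elif y[0] == '1':
--         f = x[0]
--     elif x[0] == y[0]:
--         f = '1'
--         s *= -1
--     elif (x[0], y[0]) in t:
--         f = t[x[0], y[0]]
--     else:
--         f = t[y[0], x[0]]
--         s *= -1
--     return (f, s)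
--
-- def solve(s):
--     p = ('1', 1)
--     v1 = [p]
--     for c in s:
--         p = mul(p, (c, 1))
--         v1.append(p)
--     p = ('1', 1)
--     v2 = [p]
--     for c in reversed(s):
--         p = mul((c, 1), p)
--         v2.append(p)
--     v2.reverse()
--     flag = False
--     for p1, p2 in zip(v1, v2):
--         if not flag:
--             flag = (p1 == ('i', 1))
--         elif p1 == p2 == ('k', 1):
--             return True
--     return False
-- ===== SOURCE B (Python) =====
-- def mul(x, y):
--     t = {
--         ('i', 'j'): 'k',
--         ('j', 'k'): 'i',
--         ('k', 'i'): 'j'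
--     }
--     s = x[1]*y[1]
--     if x[0] == '1':
--         f = y[0]
--     elif y[0] == '1':
--         f = x[0]
--     elif x[0] == y[0]:
--         f = '1'
--         s *= -1
--     elif (x[0], y[0]) in t:
--         f = t[x[0], y[0]]
--     else:
--         f = t[y[0], x[0]]
--         s *= -1
--     return (f, s)
--
-- def solve(s):
--     # One forward pass: track running prefix product p and a 3-stage automaton.
--     # stage 0: waiting for a prefix equal to ('i',1); stage 1: waiting for a
--     # strictly later prefix equal to ('k',1); stage 2: both found.
--     # The suffix-product check of the original is implied by total == ('1',-1).
--     p = ('1', 1)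
--     stage = 0
--     for c in s:
--         if stage == 0:
--             if p == ('i', 1):
--                 stage = 1
--         elif stage == 1:
--             if p == ('k', 1):
--                 stage = 2
--         p = mul(p, (c, 1))
--     return stage == 2 and p == ('1', -1)
-- ===== Notes on version B (the rewrite author's own statement) =====
-- stated objective: simpler
-- what changed: B replaces A's three passes (prefix-product list, reversed suffix-product list, then a zip scan with a flag) by a single forward pass that keeps only the running prefix product and a 3-stage automaton, using the group identity that suffix(b) = ('k',1) is equivalent to prefix(b) = ('k',1) once the total product is ('1',-1).
-- outside the precondition, e.g. on solve('x'): A returns False, B returns False; on solve('xxy'): A raises KeyError, B returns False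
import Mathlib
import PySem

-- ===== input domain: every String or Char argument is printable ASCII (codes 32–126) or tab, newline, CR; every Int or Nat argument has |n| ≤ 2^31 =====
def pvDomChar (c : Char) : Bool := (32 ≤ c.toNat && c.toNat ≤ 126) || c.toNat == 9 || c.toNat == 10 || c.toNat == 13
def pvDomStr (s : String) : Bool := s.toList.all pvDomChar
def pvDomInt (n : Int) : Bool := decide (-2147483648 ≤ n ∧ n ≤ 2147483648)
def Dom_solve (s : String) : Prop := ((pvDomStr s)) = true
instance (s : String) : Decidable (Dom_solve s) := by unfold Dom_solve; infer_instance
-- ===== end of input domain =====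

-- B replaces A's two scans (prefix list + reversed suffix list, then a zip scan) by ONE
-- forward pass with a 3-stage automaton; the suffix==('k',1) test is implied by the
-- total product being ('1',-1).  Objective: simpler (and one pass instead of three).

-- ===== PORT A =====
def pvT : PySem.Dict (Char × Char) Char :=
  ((PySem.Dict.empty.insert ('i', 'j') 'k').insert ('j', 'k') 'i').insert ('k', 'i') 'j'

def pvMul (x y : Char × Int) : Option (Char × Int) :=
  let s := x.2 * y.2
  if x.1 = '1' then some (y.1, s)
  else if y.1 = '1' then some (x.1, s)
  else if x.1 = y.1 then some ('1', s * -1)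
  else
    match pvT.get? (x.1, y.1) with
    | some f => some (f, s)
    | none =>
      match pvT.get? (y.1, x.1) with
      | some f => some (f, s * -1)
      | none => none    -- Python raises KeyError here (outside Pre_solve)

def solve (s : String) : Bool :=
  let r1 := s.toList.foldl
    (fun acc c => acc.bind fun pv => (pvMul pv.1 (c, 1)).map fun p' => (p', pv.2 ++ [p']))
    (some ((('1' : Char), (1 : Int)), [(('1' : Char), (1 : Int))]))
  match r1 with
  | none => false    -- KeyError: outside Pre_solve
  | some pv1 =>
    let r2 := s.toList.reverse.foldl
      (fun acc c => acc.bind fun pv => (pvMul (c, 1) pv.1).map fun p' => (p', pv.2 ++ [p']))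
      (some ((('1' : Char), (1 : Int)), [(('1' : Char), (1 : Int))]))
    match r2 with
    | none => false    -- KeyError: outside Pre_solve
    | some pv2 =>
      let v2 := pv2.2.reverse
      ((pv1.2.zip v2).foldl
        (fun (st : Bool × Bool) pq =>
          if st.2 then st
          else if !st.1 then (pq.1 == (('i' : Char), (1 : Int)), false)
          else if pq.1 == (('k' : Char), (1 : Int)) && pq.2 == (('k' : Char), (1 : Int)) then
            (st.1, true)
          else st)
        (false, false)).2

-- ===== PORT B =====
def solve_alt (s : String) : Bool :=
  let r := s.toList.foldl
    (fun acc c => acc.bind fun ps =>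
      let stage : Nat :=
        if ps.2 == 0 then (if ps.1 == (('i' : Char), (1 : Int)) then 1 else 0)
        else if ps.2 == 1 then (if ps.1 == (('k' : Char), (1 : Int)) then 2 else 1)
        else ps.2
      (pvMul ps.1 (c, 1)).map fun p' => (p', stage))
    (some ((('1' : Char), (1 : Int)), (0 : Nat)))
  match r with
  | none => false    -- KeyError: outside Pre_solve
  | some ps => ps.2 == 2 && ps.1 == (('1' : Char), (-1 : Int))

-- ===== PRECONDITION & SPEC =====
-- Pre_ restricts to strings over the quaternion alphabet {'1','i','j','k'}: on other
-- characters A's mul raises KeyError on most inputs; A returns (False) only on degenerate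
-- patterns such as a single repeated foreign letter, which are excluded for uniformity.
def Pre_solve (s : String) : Prop :=
  (s.toList.all fun c => c == '1' || c == 'i' || c == 'j' || c == 'k') = true
instance (s : String) : Decidable (Pre_solve s) := by unfold Pre_solve; infer_instance

def pvWitness_solve : String := "ijk"

def Spec_solve (s : String) (out : Bool) : Prop := out = solve_alt s
instance (s : String) (out : Bool) : Decidable (Spec_solve s out) := by unfold Spec_solve; infer_instance

-- ===== CLAIM (what is proved, stated in full; the proofs are below) =====
def Claim_equal_solve : Prop := ∀ (s : String), Dom_solve s → Pre_solve s → Spec_solve s (solve s)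

-- ===== LEMMAS AND PROOFS =====

def pvAl : List Char := ['1', 'i', 'j', 'k']

def pvQ8 : List (Char × Int) :=
  [('1', 1), ('1', -1), ('i', 1), ('i', -1), ('j', 1), ('j', -1), ('k', 1), ('k', -1)]

/-- Total version of `pvMul`, for proof use (agrees with `pvMul` on `pvQ8`). -/
def mulQ (x y : Char × Int) : Char × Int := (pvMul x y).getD ('1', 1)

lemma pvMul_closed : ∀ x ∈ pvQ8, ∀ y ∈ pvQ8, pvMul x y = some (mulQ x y) ∧ mulQ x y ∈ pvQ8 := by
  decide

lemma mulQ_assoc : ∀ x ∈ pvQ8, ∀ y ∈ pvQ8, ∀ z ∈ pvQ8,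
    mulQ (mulQ x y) z = mulQ x (mulQ y z) := by decide

lemma mulQ_k1 : ∀ x ∈ pvQ8, ∀ y ∈ pvQ8,
    mulQ x y = ('1', -1) → (x = ('k', 1) ↔ y = ('k', 1)) := by decide

lemma alpha_q8 : ∀ c ∈ pvAl, (c, (1 : Int)) ∈ pvQ8 := by
  intro c hc; fin_cases hc <;> decide

/-- prefix scan: running products after each character -/
def scanP (p : Char × Int) : List Char → List (Char × Int)
  | [] => []
  | c :: cs => mulQ p (c, 1) :: scanP (mulQ p (c, 1)) cs

/-- reverse-pass scan (multiplying on the left) -/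
def scanR (p : Char × Int) : List Char → List (Char × Int)
  | [] => []
  | c :: cs => mulQ (c, 1) p :: scanR (mulQ (c, 1) p) cs

/-- right product of a character list -/
def Sl : List Char → Char × Int
  | [] => ('1', 1)
  | c :: cs => mulQ (c, 1) (Sl cs)

/-- list of suffix products, longest first -/
def sufL : List Char → List (Char × Int)
  | [] => [('1', 1)]
  | c :: cs => mulQ (c, 1) (Sl cs) :: sufL cs

/-- left product starting from p -/
def Pf (p : Char × Int) (l : List Char) : Char × Int := l.foldl (fun a c => mulQ a (c, 1)) p

def Rf (p : Char × Int) (m : List Char) : Char × Int := m.foldl (fun a c => mulQ (c, 1) a) p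

def stgStep (x : Char × Int) (st : Nat) : Nat :=
  if st == 0 then (if x == (('i' : Char), (1 : Int)) then 1 else 0)
  else if st == 1 then (if x == (('k' : Char), (1 : Int)) then 2 else 1)
  else st

def stgRun (st : Nat) (l : List (Char × Int)) : Nat := l.foldl (fun a x => stgStep x a) st

/-- the flag/early-return machine of A's zip loop -/
def mach {α : Type} (f g : α → Bool) : Bool → List α → Bool
  | _, [] => false
  | flag, x :: xs => if !flag then mach f g (f x) xs
                     else if g x then true else mach f g flag xs


lemma scanP_length : ∀ (l : List Char) (p : Char × Int), (scanP p l).length = l.length := by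
  intro l; induction l with
  | nil => intro p; rfl
  | cons c cs ih => intro p; simp [scanP, ih]

lemma sufL_length : ∀ l : List Char, (sufL l).length = l.length + 1 := by
  intro l; induction l with
  | nil => rfl
  | cons c cs ih => simp [sufL, ih]

lemma Sl_mem : ∀ l : List Char, (∀ c ∈ l, c ∈ pvAl) → Sl l ∈ pvQ8 := by
  intro l; induction l with
  | nil => intro _; decide
  | cons c cs ih =>
    intro h
    have hc : (c, (1 : Int)) ∈ pvQ8 := alpha_q8 c (h c (by simp))
    exact (pvMul_closed _ hc _ (ih fun c hc' => h c (by simp [hc']))).2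

lemma foldA_eq : ∀ (l : List Char) (p : Char × Int) (v : List (Char × Int)),
    p ∈ pvQ8 → (∀ c ∈ l, c ∈ pvAl) →
    l.foldl (fun acc c => acc.bind fun pv => (pvMul pv.1 (c, 1)).map fun p' => (p', pv.2 ++ [p']))
        (some (p, v))
      = some (Pf p l, v ++ scanP p l) := by
  intro l; induction l with
  | nil => intro p v _ _; simp [Pf, scanP]
  | cons c cs ih =>
    intro p v hp hl
    have hc : (c, (1 : Int)) ∈ pvQ8 := alpha_q8 c (hl c (by simp))
    have h := pvMul_closed p hp _ hc
    simp only [List.foldl_cons, Option.bind_some, h.1, Option.map_some]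
    rw [ih _ _ h.2 (fun c hc' => hl c (by simp [hc']))]
    simp [Pf, scanP]

lemma foldR_eq : ∀ (m : List Char) (p : Char × Int) (v : List (Char × Int)),
    p ∈ pvQ8 → (∀ c ∈ m, c ∈ pvAl) →
    m.foldl (fun acc c => acc.bind fun pv => (pvMul (c, 1) pv.1).map fun p' => (p', pv.2 ++ [p']))
        (some (p, v))
      = some (Rf p m, v ++ scanR p m) := by
  intro m; induction m with
  | nil => intro p v _ _; simp [Rf, scanR]
  | cons c cs ih =>
    intro p v hp hl
    have hc : (c, (1 : Int)) ∈ pvQ8 := alpha_q8 c (hl c (by simp))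
    have h := pvMul_closed _ hc p hp
    simp only [List.foldl_cons, Option.bind_some, h.1, Option.map_some]
    rw [ih _ _ h.2 (fun c hc' => hl c (by simp [hc']))]
    simp [Rf, scanR]

lemma scanR_append : ∀ (m m' : List Char) (p : Char × Int),
    scanR p (m ++ m') = scanR p m ++ scanR (Rf p m) m' := by
  intro m; induction m with
  | nil => intro m' p; simp [scanR, Rf]
  | cons c cs ih => intro m' p; simp [scanR, ih, Rf, List.foldl_cons]

lemma Rf_reverse : ∀ l : List Char, Rf ('1', 1) l.reverse = Sl l := by
  intro l; induction l with
  | nil => rfl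
  | cons c cs ih => simp [Rf, List.foldl_append] at *; simp [Sl, ih]

lemma sufL_eq_reverse : ∀ l : List Char,
    ((('1', 1) :: scanR ('1', 1) l.reverse) : List (Char × Int)).reverse = sufL l := by
  intro l; induction l with
  | nil => rfl
  | cons c cs ih =>
    have h1 : (c :: cs).reverse = cs.reverse ++ [c] := by simp
    rw [h1, scanR_append, Rf_reverse, ← List.cons_append, List.reverse_append, ih]
    rfl

lemma mulQ_one : ∀ p ∈ pvQ8, mulQ p ('1', 1) = p := by decide

lemma zipinv : ∀ (l : List Char) (p : Char × Int), p ∈ pvQ8 → (∀ c ∈ l, c ∈ pvAl) →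
    ∀ pq ∈ (p :: scanP p l).zip (sufL l),
      pq.1 ∈ pvQ8 ∧ pq.2 ∈ pvQ8 ∧ mulQ pq.1 pq.2 = mulQ p (Sl l) := by
  intro l; induction l with
  | nil =>
    intro p hp _ pq hpq
    simp [scanP, sufL, List.zip] at hpq
    subst hpq
    refine ⟨hp, ?_, rfl⟩
    show (('1' : Char), (1 : Int)) ∈ pvQ8
    decide
  | cons c cs ih =>
    intro p hp hl pq hpq
    have hc : (c, (1 : Int)) ∈ pvQ8 := alpha_q8 c (hl c (by simp))
    have hq : mulQ p (c, 1) ∈ pvQ8 := (pvMul_closed p hp _ hc).2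
    have hS : Sl cs ∈ pvQ8 := Sl_mem cs (fun x hx => hl x (by simp [hx]))
    simp only [scanP, sufL, List.zip_cons_cons] at hpq
    rcases List.mem_cons.mp hpq with h | h
    · subst h
      exact ⟨hp, (pvMul_closed _ hc _ hS).2, rfl⟩
    · have := ih (mulQ p (c, 1)) hq (fun x hx => hl x (by simp [hx])) pq h
      refine ⟨this.1, this.2.1, ?_⟩
      rw [this.2.2, mulQ_assoc p hp _ hc _ hS]
      rfl

lemma Pf_Sl : ∀ (l : List Char) (p : Char × Int), p ∈ pvQ8 → (∀ c ∈ l, c ∈ pvAl) →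
    Pf p l = mulQ p (Sl l) := by
  intro l; induction l with
  | nil => intro p hp _; simp [Pf, Sl, mulQ_one p hp]
  | cons c cs ih =>
    intro p hp hl
    have hc : (c, (1 : Int)) ∈ pvQ8 := alpha_q8 c (hl c (by simp))
    have hq : mulQ p (c, 1) ∈ pvQ8 := (pvMul_closed p hp _ hc).2
    have hS : Sl cs ∈ pvQ8 := Sl_mem cs (fun x hx => hl x (by simp [hx]))
    show Pf (mulQ p (c, 1)) cs = mulQ p (Sl (c :: cs))
    rw [ih _ hq (fun x hx => hl x (by simp [hx]))]
    exact mulQ_assoc p hp _ hc _ hS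

lemma scanP_snoc : ∀ (l : List Char) (p : Char × Int),
    p :: scanP p l = (p :: scanP p l).dropLast ++ [Pf p l] := by
  intro l; induction l with
  | nil => intro p; rfl
  | cons c cs ih =>
    intro p
    show p :: (mulQ p (c, 1) :: scanP (mulQ p (c, 1)) cs)
        = (p :: (mulQ p (c, 1) :: scanP (mulQ p (c, 1)) cs)).dropLast ++ [Pf p (c :: cs)]
    rw [List.dropLast_cons₂]
    have := ih (mulQ p (c, 1))
    conv_lhs => rw [this]
    rfl

lemma mach_congr {α : Type} : ∀ (l : List α) (f f' g g' : α → Bool) (b : Bool),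
    (∀ x ∈ l, f x = f' x) → (∀ x ∈ l, g x = g' x) → mach f g b l = mach f' g' b l := by
  intro l; induction l with
  | nil => intro _ _ _ _ b _ _; rfl
  | cons x xs ih =>
    intro f f' g g' b hf hg
    simp only [mach]
    rw [hf x (by simp), hg x (by simp),
        ih f f' g g' _ (fun y hy => hf y (by simp [hy])) (fun y hy => hg y (by simp [hy])),
        ih f f' g g' _ (fun y hy => hf y (by simp [hy])) (fun y hy => hg y (by simp [hy]))]

lemma mach_map {α β : Type} : ∀ (l : List α) (h : α → β) (f g : β → Bool) (b : Bool),
    mach f g b (l.map h) = mach (fun x => f (h x)) (fun x => g (h x)) b l := by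
  intro l; induction l with
  | nil => intro _ _ _ _; rfl
  | cons x xs ih => intro h f g b; simp only [List.map_cons, mach, ih]

lemma mach_snoc_gfalse {α : Type} : ∀ (l : List α) (x : α) (f g : α → Bool) (b : Bool),
    g x = false → mach f g b (l ++ [x]) = mach f g b l := by
  intro l; induction l with
  | nil =>
    intro x f g b hx
    cases b <;> simp [mach, hx]
  | cons y ys ih =>
    intro x f g b hx
    simp only [List.cons_append, mach, ih _ _ _ _ hx]

lemma mach_gfalse {α : Type} : ∀ (l : List α) (f g : α → Bool) (b : Bool),
    (∀ x ∈ l, g x = false) → mach f g b l = false := by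
  intro l; induction l with
  | nil => intro _ _ _ _; rfl
  | cons x xs ih =>
    intro f g b hg
    simp only [mach, hg x (by simp), ih f g _ (fun y hy => hg y (by simp [hy])),
      ih f g _ (fun y hy => hg y (by simp [hy]))]
    cases b <;> simp

lemma foldZip_found : ∀ (l : List ((Char × Int) × (Char × Int))) (flag : Bool),
    l.foldl
      (fun (st : Bool × Bool) pq =>
        if st.2 then st
        else if !st.1 then (pq.1 == (('i' : Char), (1 : Int)), false)
        else if pq.1 == (('k' : Char), (1 : Int)) && pq.2 == (('k' : Char), (1 : Int)) then
          (st.1, true)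
        else st)
      (flag, true) = (flag, true) := by
  intro l; induction l with
  | nil => intro flag; rfl
  | cons pq l ih => intro flag; simp only [List.foldl_cons]; exact ih flag

lemma foldZip_mach : ∀ (l : List ((Char × Int) × (Char × Int))) (flag : Bool),
    (l.foldl
      (fun (st : Bool × Bool) pq =>
        if st.2 then st
        else if !st.1 then (pq.1 == (('i' : Char), (1 : Int)), false)
        else if pq.1 == (('k' : Char), (1 : Int)) && pq.2 == (('k' : Char), (1 : Int)) then
          (st.1, true)
        else st)
      (flag, false)).2
    = mach (fun pq => pq.1 == (('i' : Char), (1 : Int)))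
           (fun pq => pq.1 == (('k' : Char), (1 : Int)) && pq.2 == (('k' : Char), (1 : Int)))
           flag l := by
  intro l; induction l with
  | nil => intro flag; rfl
  | cons pq l ih =>
    intro flag
    cases flag with
    | false => simp only [List.foldl_cons, mach]; exact ih _
    | true =>
      by_cases hg : (pq.1 == (('k' : Char), (1 : Int)) && pq.2 == (('k' : Char), (1 : Int))) = true
      · have hstep : (if ((false : Bool)) = true then ((true : Bool), (false : Bool))
            else if (!(true : Bool)) = true then (pq.1 == (('i' : Char), (1 : Int)), false)
            else if pq.1 == (('k' : Char), (1 : Int)) && pq.2 == (('k' : Char), (1 : Int)) then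
              ((true : Bool), (true : Bool))
            else (true, false)) = ((true : Bool), (true : Bool)) := by
          simp [hg]
        simp only [List.foldl_cons]
        rw [hstep, foldZip_found]
        simp [mach, hg]
      · simp only [Bool.not_eq_true] at hg
        simp only [List.foldl_cons, mach, hg]
        simpa using ih true

lemma foldB_eq : ∀ (l : List Char) (p : Char × Int) (st : Nat),
    p ∈ pvQ8 → (∀ c ∈ l, c ∈ pvAl) →
    l.foldl
      (fun acc c => acc.bind fun ps =>
        let stage : Nat :=
          if ps.2 == 0 then (if ps.1 == (('i' : Char), (1 : Int)) then 1 else 0)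
          else if ps.2 == 1 then (if ps.1 == (('k' : Char), (1 : Int)) then 2 else 1)
          else ps.2
        (pvMul ps.1 (c, 1)).map fun p' => (p', stage))
      (some (p, st))
    = some (Pf p l, stgRun st ((p :: scanP p l).dropLast)) := by
  intro l; induction l with
  | nil => intro p st _ _; rfl
  | cons c cs ih =>
    intro p st hp hl
    have hc : (c, (1 : Int)) ∈ pvQ8 := alpha_q8 c (hl c (by simp))
    have h := pvMul_closed p hp _ hc
    simp only [List.foldl_cons, Option.bind_some, h.1, Option.map_some]
    rw [ih _ _ h.2 (fun x hx => hl x (by simp [hx]))]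
    show _ = some (Pf p (c :: cs), stgRun st ((p :: scanP p (c :: cs)).dropLast))
    have hdl : (p :: scanP p (c :: cs)).dropLast
        = p :: ((mulQ p (c, 1) :: scanP (mulQ p (c, 1)) cs).dropLast) := by
      show (p :: (mulQ p (c, 1) :: scanP (mulQ p (c, 1)) cs)).dropLast = _
      rw [List.dropLast_cons₂]
    rw [hdl]
    show some (Pf (mulQ p (c, 1)) cs, stgRun (stgStep p st) _) = _
    rfl

lemma stgRun_two : ∀ l : List (Char × Int), stgRun 2 l = 2 := by
  intro l; induction l with
  | nil => rfl
  | cons x xs ih => simpa [stgRun, stgStep] using ih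

lemma stgRun_mach : ∀ (l : List (Char × Int)) (st : Nat), st = 0 ∨ st = 1 →
    (stgRun st l == 2)
      = mach (fun x => x == (('i' : Char), (1 : Int)))
          (fun x => x == (('k' : Char), (1 : Int))) (st == 1) l := by
  intro l; induction l with
  | nil => rintro st (rfl | rfl) <;> rfl
  | cons x xs ih =>
    rintro st (rfl | rfl)
    · show (stgRun (stgStep x 0) xs == 2) = mach _ _ false (x :: xs)
      by_cases hx : (x == (('i' : Char), (1 : Int))) = true
      · simp only [stgStep, hx]
        simp only [mach, hx]
        simpa using ih 1 (Or.inr rfl)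
      · simp only [Bool.not_eq_true] at hx
        simp only [stgStep, hx]
        simp only [mach, hx]
        simpa using ih 0 (Or.inl rfl)
    · show (stgRun (stgStep x 1) xs == 2) = mach _ _ true (x :: xs)
      by_cases hx : (x == (('k' : Char), (1 : Int))) = true
      · simp only [stgStep, hx]
        simp only [mach, hx]
        simp [stgRun_two]
      · simp only [Bool.not_eq_true] at hx
        simp only [stgStep, hx]
        simp only [mach, hx]
        simpa using ih 1 (Or.inr rfl)

-- ===== VERDICT (by name: the statement is the Claim_ definition above) =====
theorem solve_spec : Claim_equal_solve := by
  intro s _ hpre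
  show solve s = solve_alt s
  have hl : ∀ c ∈ s.toList, c ∈ pvAl := by
    intro c hc
    have h := List.all_eq_true.mp hpre c hc
    simp only [Bool.or_eq_true, beq_iff_eq] at h
    rcases h with ((h | h) | h) | h <;> simp [pvAl, h]
  have hp0 : ((('1' : Char), (1 : Int)) : Char × Int) ∈ pvQ8 := by decide
  have hlr : ∀ c ∈ s.toList.reverse, c ∈ pvAl := by
    intro c hc; exact hl c (List.mem_reverse.mp hc)
  -- evaluate port A
  rw [solve, solve_alt]
  rw [foldA_eq s.toList _ _ hp0 hl]
  rw [foldR_eq s.toList.reverse _ _ hp0 hlr]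
  rw [foldB_eq s.toList _ 0 hp0 hl]
  simp only []
  have hv2 : ([(('1' : Char), (1 : Int))] ++ scanR ('1', 1) s.toList.reverse).reverse
      = sufL s.toList := by
    rw [List.singleton_append]; exact sufL_eq_reverse s.toList
  rw [hv2, foldZip_mach]
  rw [stgRun_mach _ 0 (Or.inl rfl)]
  simp only [List.singleton_append, show ((0 : Nat) == 1) = false from rfl]
  set l := s.toList with hldef
  set p0 : Char × Int := (('1' : Char), (1 : Int)) with hp0def
  set V : List (Char × Int) := p0 :: scanP p0 l with hV
  have hzip := zipinv l p0 hp0 hl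
  have hPf : Pf p0 l = mulQ p0 (Sl l) := Pf_Sl l p0 hp0 hl
  by_cases hT : Pf p0 l = (('1' : Char), (-1 : Int))
  · -- total product is ('1',-1): g-test collapses to the prefix test
    have hT' : mulQ p0 (Sl l) = (('1' : Char), (-1 : Int)) := hPf ▸ hT
    have hcongr : mach (fun pq => pq.1 == (('i' : Char), (1 : Int)))
        (fun pq : (Char × Int) × (Char × Int) =>
          pq.1 == (('k' : Char), (1 : Int)) && pq.2 == (('k' : Char), (1 : Int)))
        false (V.zip (sufL l))
        = mach (fun pq => pq.1 == (('i' : Char), (1 : Int)))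
            (fun pq => pq.1 == (('k' : Char), (1 : Int))) false (V.zip (sufL l)) := by
      apply mach_congr _ _ _ _ _ _ (fun _ _ => rfl)
      intro pq hpq
      obtain ⟨h1, h2, h3⟩ := hzip pq hpq
      have hiff : pq.1 = (('k' : Char), (1 : Int)) ↔ pq.2 = (('k' : Char), (1 : Int)) :=
        mulQ_k1 pq.1 h1 pq.2 h2 (h3.trans hT')
      by_cases hk : pq.1 = (('k' : Char), (1 : Int))
      · simp [hk, hiff.mp hk]
      · simp [hk]
    rw [hcongr]
    have hmap : (V.zip (sufL l)).map Prod.fst = V := by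
      apply List.map_fst_zip
      simp [hV, scanP_length, sufL_length]
    have : mach (fun pq : (Char × Int) × (Char × Int) => pq.1 == (('i' : Char), (1 : Int)))
        (fun pq => pq.1 == (('k' : Char), (1 : Int))) false (V.zip (sufL l))
        = mach (fun x => x == (('i' : Char), (1 : Int)))
            (fun x => x == (('k' : Char), (1 : Int))) false V := by
      conv_rhs => rw [← hmap]
      rw [mach_map]
    rw [this]
    have hsnoc : V = V.dropLast ++ [Pf p0 l] := scanP_snoc l p0
    conv_lhs => rw [hsnoc]
    rw [mach_snoc_gfalse _ _ _ _ _ (by rw [hT]; decide)]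
    simp [hT]
  · -- total product differs from ('1',-1): both sides are false
    have hA : mach (fun pq => pq.1 == (('i' : Char), (1 : Int)))
        (fun pq : (Char × Int) × (Char × Int) =>
          pq.1 == (('k' : Char), (1 : Int)) && pq.2 == (('k' : Char), (1 : Int)))
        false (V.zip (sufL l)) = false := by
      apply mach_gfalse
      intro pq hpq
      obtain ⟨h1, h2, h3⟩ := hzip pq hpq
      by_cases hk1 : pq.1 = (('k' : Char), (1 : Int))
      · by_cases hk2 : pq.2 = (('k' : Char), (1 : Int))
        · exfalso
          apply hT
          rw [hPf, ← h3, hk1, hk2]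
          decide
        · simp [hk2]
      · simp [hk1]
    rw [hA]
    simp [hT]
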